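-- pv_equiv track=rewrite | github.com/Toddoward/Programmers | 프로그래머스/2/12945. 피보나치 수/피보나치 수.py | solution
-- ===== SOURCE A (Python) =====
-- def solution(n):
--     res, base = [[1, 0], [0, 1]], [[1, 1], [1, 0]]
--     n_temp = n - 1 if n > 0 else 0
--     while n_temp > 0:
--         if n_temp % 2 == 1:
--             res = [[sum(res[i][k] * base[k][j] for k in range(2)) for j in range(2)] for i in range(2)]
--         base = [[sum(base[i][k] * base[k][j] for k in range(2)) for j in range(2)] for i in range(2)]
--         n_temp //= 2
--     return res[0][0] % 1234567 if n > 0 else 0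
-- ===== SOURCE B (Python) =====
-- def solution(n):
--     a, b = 0, 1
--     for _ in range(n):
--         a, b = b, (a + b) % 1234567
--     return a % 1234567
-- ===== Notes on version B (the rewrite author's own statement) =====
-- stated objective: simpler
-- what changed: Replaces 2x2 matrix fast exponentiation with a plain linear Fibonacci loop (a, b = b, (a+b) % 1234567), reducing mod 1234567 at each step.
import Mathlib
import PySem

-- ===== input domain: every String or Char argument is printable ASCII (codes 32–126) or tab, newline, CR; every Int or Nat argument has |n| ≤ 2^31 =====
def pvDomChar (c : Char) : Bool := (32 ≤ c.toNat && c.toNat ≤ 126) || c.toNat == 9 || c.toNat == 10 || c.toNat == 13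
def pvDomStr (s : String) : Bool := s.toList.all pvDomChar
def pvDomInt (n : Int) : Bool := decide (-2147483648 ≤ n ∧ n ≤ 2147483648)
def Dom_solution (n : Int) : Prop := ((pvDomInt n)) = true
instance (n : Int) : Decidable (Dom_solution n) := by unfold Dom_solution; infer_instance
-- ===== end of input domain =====

-- B replaces A's 2x2-matrix fast exponentiation by the plain linear Fibonacci loop (simpler).

-- ===== PORT A =====
-- 2x2 integer matrix [[a, b], [c, d]] (A's lists of lists, fixed shape 2x2)
structure M2 where
  a : Int
  b : Int
  c : Int
  d : Int
deriving DecidableEq, Repr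

-- the 2x2 matrix product A computes entrywise with sum(res[i][k]*base[k][j] for k in range(2))
def aMul (x y : M2) : M2 :=
  ⟨x.a * y.a + x.b * y.c, x.a * y.b + x.b * y.d,
   x.c * y.a + x.d * y.c, x.c * y.b + x.d * y.d⟩

-- A's while loop over n_temp
def aLoop (res base : M2) (t : Int) : M2 :=
  if _h : t > 0 then
    aLoop (if t % 2 == 1 then aMul res base else res) (aMul base base) (PySem.Int.floordiv t 2)
  else res
termination_by t.toNat
decreasing_by
  rw [PySem.Int.floordiv_eq_ediv_of_pos (by omega : (0:Int) < 2)]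
  omega

def solution (n : Int) : Int :=
  let res : M2 := ⟨1, 0, 0, 1⟩
  let base : M2 := ⟨1, 1, 1, 0⟩
  let n_temp : Int := if n > 0 then n - 1 else 0
  let r := aLoop res base n_temp
  if n > 0 then r.a % 1234567 else 0

-- ===== PORT B =====
def solution_alt (n : Int) : Int :=
  let p := (PySem.List.pyRange 0 n 1).foldl
    (fun (ab : Int × Int) _ => (ab.2, (ab.1 + ab.2) % 1234567)) (0, 1)
  p.1 % 1234567

-- ===== PRECONDITION & SPEC =====
def Spec_solution (n : Int) (out : Int) : Prop := out = solution_alt n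
instance (n : Int) (out : Int) : Decidable (Spec_solution n out) := by unfold Spec_solution; infer_instance

-- ===== CLAIM (what is proved, stated in full; the proofs are below) =====
def Claim_equal_solution : Prop := ∀ (n : Int), Dom_solution n → Spec_solution n (solution n)

-- ===== LEMMAS AND PROOFS =====

-- Fibonacci numbers
def F : Nat → Int
  | 0 => 0
  | 1 => 1
  | k + 2 => F (k + 1) + F k

def mId : M2 := ⟨1, 0, 0, 1⟩

def mpow (b : M2) : Nat → M2
  | 0 => mId
  | k + 1 => aMul (mpow b k) b

theorem aMul_assoc (x y z : M2) : aMul (aMul x y) z = aMul x (aMul y z) := by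
  cases x; cases y; cases z
  simp only [aMul, M2.mk.injEq]
  exact ⟨by ring, by ring, by ring, by ring⟩

theorem aMul_one (x : M2) : aMul x mId = x := by
  cases x; simp [aMul, mId]

theorem one_aMul (x : M2) : aMul mId x = x := by
  cases x; simp [aMul, mId]

theorem mpow_succ_left (b : M2) (k : Nat) : mpow b (k + 1) = aMul b (mpow b k) := by
  induction k with
  | zero => simp [mpow, aMul_one, one_aMul]
  | succ k ih =>
    show aMul (mpow b (k + 1)) b = _
    conv_lhs => rw [ih]
    rw [aMul_assoc]
    rfl

theorem mpow_sq (b : M2) (k : Nat) : mpow (aMul b b) k = mpow b (2 * k) := by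
  induction k with
  | zero => rfl
  | succ k ih =>
    have h2 : 2 * (k + 1) = (2 * k + 1) + 1 := by ring
    rw [h2]
    show aMul (mpow (aMul b b) k) (aMul b b) = aMul (mpow b (2 * k + 1)) b
    rw [ih]
    show _ = aMul (aMul (mpow b (2 * k)) b) b
    rw [aMul_assoc]

theorem aLoop_eq (m : Nat) (t : Int) (res base : M2) (hm : t.toNat ≤ m) :
    aLoop res base t = aMul res (mpow base t.toNat) := by
  induction m generalizing t res base with
  | zero =>
    have ht : ¬ t > 0 := by omega
    rw [aLoop, dif_neg ht]
    have : t.toNat = 0 := by omega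
    rw [this]
    exact (aMul_one res).symm
  | succ m ih =>
    by_cases ht : t > 0
    · rw [aLoop, dif_pos ht]
      rw [PySem.Int.floordiv_eq_ediv_of_pos (by omega : (0:Int) < 2)]
      have hrec : (t / 2).toNat ≤ m := by omega
      rw [ih (t / 2) _ _ hrec, mpow_sq]
      by_cases hodd : t % 2 = 1
      · have hbeq : (t % 2 == 1) = true := by simp [hodd]
        rw [hbeq]
        simp only [if_true]
        have hk : t.toNat = 2 * (t / 2).toNat + 1 := by omega
        rw [hk]
        show aMul (aMul res base) (mpow base (2 * (t / 2).toNat)) =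
          aMul res (aMul (mpow base (2 * (t / 2).toNat)) base)
        rw [aMul_assoc]
        congr 1
        rw [← mpow_succ_left]
        rfl
      · have heven : t % 2 = 0 := by omega
        have hbeq : (t % 2 == 1) = false := by simp [heven]
        rw [hbeq]
        simp only [if_false, Bool.false_eq_true]
        have hk : t.toNat = 2 * (t / 2).toNat := by omega
        rw [hk]
    · rw [aLoop, dif_neg ht]
      have : t.toNat = 0 := by omega
      rw [this]
      exact (aMul_one res).symm

theorem mpow_fib (k : Nat) : mpow ⟨1, 1, 1, 0⟩ k = ⟨F (k + 1), F k, F k, F (k + 1) - F k⟩ := by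
  induction k with
  | zero => simp [mpow, mId, F]
  | succ k ih =>
    show aMul (mpow ⟨1, 1, 1, 0⟩ k) _ = _
    rw [ih]
    simp only [aMul, M2.mk.injEq]
    refine ⟨?_, by ring, by ring, ?_⟩
    · show F (k + 1) * 1 + F k * 1 = F (k + 1 + 1)
      rw [show k + 1 + 1 = k + 2 from rfl, F]
      ring
    · show F k * 1 + (F (k + 1) - F k) * 0 = F (k + 1 + 1) - F (k + 1)
      rw [show k + 1 + 1 = k + 2 from rfl, F]
      ring

theorem foldl_fib (l : List Int) (j : Nat) :
    l.foldl (fun (ab : Int × Int) _ => (ab.2, (ab.1 + ab.2) % 1234567))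
        (F j % 1234567, F (j + 1) % 1234567) =
      (F (j + l.length) % 1234567, F (j + l.length + 1) % 1234567) := by
  induction l generalizing j with
  | nil => simp
  | cons x xs ih =>
    simp only [List.foldl_cons, List.length_cons]
    have hstep : ((F j % 1234567, F (j + 1) % 1234567).2,
        ((F j % 1234567, F (j + 1) % 1234567).1 + (F j % 1234567, F (j + 1) % 1234567).2) % 1234567) =
        ((F (j + 1) % 1234567, F (j + 1 + 1) % 1234567) : Int × Int) := by
      simp only [Prod.mk.injEq, F]
      exact ⟨trivial, by rw [← Int.add_emod, Int.add_comm (F j)]⟩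
    rw [hstep, ih (j + 1),
      show j + 1 + xs.length = j + (xs.length + 1) from by omega]

theorem solution_alt_eq (n : Int) : solution_alt n = F n.toNat % 1234567 := by
  unfold solution_alt
  have h0 : (F 0 % 1234567, F 1 % 1234567) = ((0, 1) : Int × Int) := by simp [F]
  rw [← h0, foldl_fib, PySem.List.length_pyRange_one]
  simp [Int.emod_emod_of_dvd _ (dvd_refl (1234567 : Int))]

theorem solution_eq (n : Int) : solution n = F n.toNat % 1234567 := by
  unfold solution
  by_cases hn : n > 0
  · simp only [if_pos hn]
    rw [aLoop_eq (n - 1).toNat (n - 1) _ _ (le_refl _),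
      show (⟨1, 0, 0, 1⟩ : M2) = mId from rfl, one_aMul, mpow_fib]
    have : (n - 1).toNat + 1 = n.toNat := by omega
    rw [this]
  · simp only [if_neg hn]
    have : n.toNat = 0 := by omega
    rw [this]
    simp [F]

-- ===== VERDICT (by name: the statement is the Claim_ definition above) =====
theorem solution_spec : Claim_equal_solution := by
  intro n _
  unfold Spec_solution
  rw [solution_eq, solution_alt_eq]
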